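-- pv_equiv track=rewrite | github.com/mozman/ezdxf | src/ezdxf/shapefile.py | _parse_string_records
-- ===== SOURCE A (Python) =====
-- from typing import (
--     Dict,
--     Sequence,
--     Iterable,
--     Iterator,
--     Callable,
--     List,
--     Tuple,
--     Optional,
-- )
--
-- def _parse_string_records(data: str) -> Dict[str, Sequence[str]]:
--     records: Dict[str, Sequence[str]] = dict()
--     name = None
--     lines = []
--     for line in _filter_comments(data.split("\n")):
--         if line.startswith("*"):
--             if name is not None:
--                 records[name] = tuple(lines)
--             name = line.split(",")[0].strip()
--             lines = [line]
--         else: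
--             lines.append(line)
--
--     if name is not None:
--         records[name] = tuple(lines)
--     return records
--
-- def _filter_comments(lines: Iterable[str]) -> Iterator[str]:
--     for line in lines:
--         line = line.strip()
--         line = line.split(";")[0]
--         if line:
--             yield line
-- ===== SOURCE B (Python) =====
-- def _parse_string_records(data):
--     # Segment the cleaned lines into record groups by locating the next '*'
--     # boundary with slicing, then build the dict from the (name, group) pairs.
--     filtered = []
--     for raw in data.split("\n"):
--         text = raw.strip().split(";")[0]
--         if text:
--             filtered.append(text)
--     records = {}
--     for name, group in _record_groups(filtered):
--         records[name] = group
--     return records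
--
--
-- def _record_groups(lines):
--     groups = []
--     _, rest = _split_at_star(lines)  # drop any lines before the first record header
--     while rest:
--         head, tail = rest[0], rest[1:]
--         body, rest = _split_at_star(tail)
--         groups.append((head.split(",")[0].strip(), tuple([head] + body)))
--     return groups
--
--
-- def _split_at_star(lines):
--     i = 0
--     while i < len(lines) and not lines[i].startswith("*"):
--         i += 1
--     return lines[:i], lines[i:]
-- ===== Notes on version B (the rewrite author's own statement) =====
-- stated objective: alternative
-- what changed: Replaces A's single-pass state machine (mutable current-name/current-lines accumulator with flush-on-boundary and a final flush) by a segmentation pass: materialise the comment-filtered lines, repeatedly locate the next '*' header and slice out each record group, then build the dict from the (name, group) pairs.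
import Mathlib
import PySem

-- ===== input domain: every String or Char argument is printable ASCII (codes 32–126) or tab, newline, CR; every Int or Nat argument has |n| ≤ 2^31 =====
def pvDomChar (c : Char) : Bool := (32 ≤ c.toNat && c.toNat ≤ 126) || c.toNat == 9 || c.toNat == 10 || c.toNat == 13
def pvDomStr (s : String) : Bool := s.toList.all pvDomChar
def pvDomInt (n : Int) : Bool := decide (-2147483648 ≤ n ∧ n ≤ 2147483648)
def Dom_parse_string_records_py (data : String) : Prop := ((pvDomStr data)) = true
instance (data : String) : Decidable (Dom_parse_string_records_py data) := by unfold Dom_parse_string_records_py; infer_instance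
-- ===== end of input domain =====

-- B segments the filtered lines into record groups by slicing at '*' headers and builds
-- the dict from the pairs, instead of A's flush-on-boundary accumulator state machine
-- (alternative decomposition, same cost).


-- ===== PORT A =====
-- line.strip().split(";")[0], yielded only if non-empty (the _filter_comments generator)
def pvFilterComments (lines : List String) : List String :=
  lines.filterMap (fun line =>
    let line := PySem.Str.strip line
    let line := ((PySem.Str.split? line ";").getD []).headD ""
    if line = "" then none else some line)

-- the body of A's for-loop: state is (records, name, lines)
def pvAStep (st : PySem.Dict String (List String) × Option String × List String)
    (line : String) : PySem.Dict String (List String) × Option String × List String :=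
  if PySem.Str.startswith line "*" then
    let records := match st.2.1 with
      | some n => st.1.insert n st.2.2
      | none => st.1
    (records, some (PySem.Str.strip (((PySem.Str.split? line ",").getD []).headD "")), [line])
  else
    (st.1, st.2.1, st.2.2 ++ [line])

-- the final 'if name is not None: records[name] = tuple(lines)'
def pvAFinal (st : PySem.Dict String (List String) × Option String × List String) :
    PySem.Dict String (List String) :=
  match st.2.1 with
  | some n => st.1.insert n st.2.2
  | none => st.1

def parse_string_records_py (data : String) : List (String × List String) :=
  (pvAFinal ((pvFilterComments ((PySem.Str.split? data "\n").getD [])).foldl pvAStep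
    (PySem.Dict.empty, none, []))).items

-- ===== PORT B =====
-- _split_at_star: the index scan + two slices return
-- (longest prefix with no '*' header, the remainder) — exact
def pvAltSplitAtStar : List String → List String × List String
  | [] => ([], [])
  | l :: ls =>
    if PySem.Str.startswith l "*" then ([], l :: ls)
    else
      let p := pvAltSplitAtStar ls
      (l :: p.1, p.2)

theorem pvAltSplitAtStar_snd_length_le (ls : List String) :
    (pvAltSplitAtStar ls).2.length ≤ ls.length := by
  induction ls with
  | nil => simp [pvAltSplitAtStar]
  | cons l ls ih =>
    simp only [pvAltSplitAtStar]
    split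
    · simp
    · simpa using Nat.le_succ_of_le ih

-- the while-loop of _record_groups (rest starts at a '*' header or is empty)
def pvAltGroupsLoop : List String → List (String × List String)
  | [] => []
  | head :: tail =>
    (PySem.Str.strip (((PySem.Str.split? head ",").getD []).headD ""),
      head :: (pvAltSplitAtStar tail).1) :: pvAltGroupsLoop (pvAltSplitAtStar tail).2
  termination_by ls => ls.length
  decreasing_by simpa using Nat.lt_succ_of_le (pvAltSplitAtStar_snd_length_le tail)

def pvAltRecordGroups (lines : List String) : List (String × List String) :=
  pvAltGroupsLoop (pvAltSplitAtStar lines).2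

def parse_string_records_py_alt (data : String) : List (String × List String) :=
  let filtered := ((PySem.Str.split? data "\n").getD []).foldl (fun acc raw =>
    let text := ((PySem.Str.split? (PySem.Str.strip raw) ";").getD []).headD ""
    if text = "" then acc else acc ++ [text]) []
  ((pvAltRecordGroups filtered).foldl (fun d p => d.insert p.1 p.2)
    PySem.Dict.empty).items

-- ===== PRECONDITION & SPEC =====
def Spec_parse_string_records_py (data : String) (out : List (String × List String)) : Prop := out = parse_string_records_py_alt data
instance (data : String) (out : List (String × List String)) : Decidable (Spec_parse_string_records_py data out) := by unfold Spec_parse_string_records_py; infer_instance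

-- ===== CLAIM (what is proved, stated in full; the proofs are below) =====
def Claim_equal_parse_string_records_py : Prop := ∀ (data : String), Dom_parse_string_records_py data → Spec_parse_string_records_py data (parse_string_records_py data)

-- ===== LEMMAS AND PROOFS =====

-- B's foldl-append construction of `filtered` equals A's filterMap form.
theorem pv_filtered_eq (lines : List String) (acc : List String) :
    lines.foldl (fun acc raw =>
      let text := ((PySem.Str.split? (PySem.Str.strip raw) ";").getD []).headD ""
      if text = "" then acc else acc ++ [text]) acc
    = acc ++ pvFilterComments lines := by
  induction lines generalizing acc with
  | nil => simp [pvFilterComments]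
  | cons l ls ih =>
    simp only [List.foldl_cons, pvFilterComments, List.filterMap_cons]
    split
    · simpa [pvFilterComments] using ih acc
    · simpa [pvFilterComments] using ih (acc ++ [((PySem.Str.split? (PySem.Str.strip l) ";").getD []).headD ""])

-- A's loop, while inside a record (name = some n, current lines = acc): the record in
-- progress closes at the next '*' header (or the end) with exactly the non-star span appended.
theorem pv_loop_in_record (ls : List String) (d : PySem.Dict String (List String))
    (n : String) (acc : List String) :
    pvAFinal (ls.foldl pvAStep (d, some n, acc))
    = (((n, acc ++ (pvAltSplitAtStar ls).1) :: pvAltGroupsLoop (pvAltSplitAtStar ls).2).foldl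
        (fun d p => d.insert p.1 p.2) d) := by
  induction ls generalizing d n acc with
  | nil => simp [pvAltSplitAtStar, pvAltGroupsLoop, pvAFinal]
  | cons l ls ih =>
    cases h : PySem.Str.startswith l "*" with
    | true =>
      have h' : PySem.Chars.startswith l.toList ['*'] = true := by simpa using h
      simp only [List.foldl_cons, pvAStep, h, if_true]
      rw [ih]
      simp [pvAltSplitAtStar, h', pvAltGroupsLoop]
    | false =>
      have h' : PySem.Chars.startswith l.toList ['*'] = false := by simpa using h
      simp only [List.foldl_cons, pvAStep, h, Bool.false_eq_true, if_false]
      rw [ih]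
      simp [pvAltSplitAtStar, h']

-- A's loop before any record header (name = None): leading lines are dropped, and the
-- result is the dict built from the record groups of the remainder.
theorem pv_loop_no_record (ls : List String) (d : PySem.Dict String (List String))
    (acc : List String) :
    pvAFinal (ls.foldl pvAStep (d, none, acc))
    = ((pvAltGroupsLoop (pvAltSplitAtStar ls).2).foldl (fun d p => d.insert p.1 p.2) d) := by
  induction ls generalizing acc with
  | nil => simp [pvAltSplitAtStar, pvAltGroupsLoop, pvAFinal]
  | cons l ls ih =>
    cases h : PySem.Str.startswith l "*" with
    | true =>
      have h' : PySem.Chars.startswith l.toList ['*'] = true := by simpa using h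
      simp only [List.foldl_cons, pvAStep, h, if_true]
      rw [pv_loop_in_record]
      simp [pvAltSplitAtStar, h', pvAltGroupsLoop]
    | false =>
      have h' : PySem.Chars.startswith l.toList ['*'] = false := by simpa using h
      simp only [List.foldl_cons, pvAStep, h, Bool.false_eq_true, if_false]
      rw [ih]
      simp [pvAltSplitAtStar, h']

-- ===== VERDICT (by name: the statement is the Claim_ definition above) =====
theorem parse_string_records_py_spec : Claim_equal_parse_string_records_py := by
  intro data _
  show _ = _
  simp only [parse_string_records_py, parse_string_records_py_alt, pvAltRecordGroups]
  rw [pv_filtered_eq, List.nil_append, pv_loop_no_record]
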